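-- pv_equiv track=rewrite | github.com/qasim418/Advent_of_Code_2024 | Day_22/day22_solution.py | evaluate_sequence_batch
-- ===== SOURCE A (Python) =====
-- def find_sequence_value(changes, sequence, prices):
--     for i in range(len(changes) - 3):
--         if changes[i:i+4] == sequence:
--             return prices[i+3]
--     return 0
--
-- def evaluate_sequence_batch(args):
--     sequence, all_changes, all_prices = args
--     total = 0
--     for changes, prices in zip(all_changes, all_prices):
--         score = find_sequence_value(changes, sequence, prices)
--         if score:
--             total += score
--     return (sequence, total)
-- ===== SOURCE B (Python) =====
-- def evaluate_sequence_batch(args):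
--     sequence, all_changes, all_prices = args
--     key = tuple(sequence)
--     total = 0
--     for changes, prices in zip(all_changes, all_prices):
--         # index each buyer once: first-occurrence window -> price at its end
--         first = {}
--         for i in range(min(len(changes), len(prices)) - 3):
--             first.setdefault(tuple(changes[i:i+4]), prices[i+3])
--         total += first.get(key, 0)
--     return (sequence, total)
-- ===== Notes on version B (the rewrite author's own statement) =====
-- stated objective: alternative
-- what changed: B builds a per-buyer dict mapping each 4-change window to the price at its end (setdefault keeps the first occurrence) and answers by one hash lookup, instead of A's scan with early exit and the redundant 'if score' guard; the helper find_sequence_value disappears.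
import Mathlib
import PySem

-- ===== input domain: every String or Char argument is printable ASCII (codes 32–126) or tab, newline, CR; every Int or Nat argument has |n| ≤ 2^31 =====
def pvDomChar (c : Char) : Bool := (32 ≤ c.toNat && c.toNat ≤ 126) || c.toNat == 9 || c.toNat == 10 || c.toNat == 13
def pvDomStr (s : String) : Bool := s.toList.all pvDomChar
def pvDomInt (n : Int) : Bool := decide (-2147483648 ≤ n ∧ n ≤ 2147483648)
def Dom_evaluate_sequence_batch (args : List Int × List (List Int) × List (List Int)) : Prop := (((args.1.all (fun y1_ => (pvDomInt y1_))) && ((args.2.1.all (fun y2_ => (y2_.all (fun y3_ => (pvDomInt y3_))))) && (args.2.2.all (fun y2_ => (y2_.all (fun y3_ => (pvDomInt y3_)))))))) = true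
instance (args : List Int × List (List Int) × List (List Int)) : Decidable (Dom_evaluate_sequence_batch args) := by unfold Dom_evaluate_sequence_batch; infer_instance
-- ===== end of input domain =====

-- B replaces A's early-exit scan per buyer by a first-occurrence window→price dict plus one lookup (alternative decomposition, same cost).

-- ===== PORT A =====
-- find_sequence_value's loop with early return; prices[i+3] is in range on every
-- input admitted by Pre_ (out of range Python raises IndexError; the .getD 0 is never taken there).
def fsvGo (changes sequence prices : List Int) : List Int → Int
  | [] => 0
  | i :: rest =>
    if PySem.List.slice changes (some i) (some (i + 4)) = sequence then
      (PySem.List.pyGet? prices (i + 3)).getD 0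
    else fsvGo changes sequence prices rest

def find_sequence_value (changes sequence prices : List Int) : Int :=
  fsvGo changes sequence prices (PySem.List.pyRange 0 ((changes.length : Int) - 3) 1)

def evaluate_sequence_batch (args : List Int × List (List Int) × List (List Int)) : List Int × Int :=
  let sequence := args.1
  let total := (args.2.1.zip args.2.2).foldl
    (fun total cp =>
      let score := find_sequence_value cp.1 sequence cp.2
      if score ≠ 0 then total + score else total) 0
  (sequence, total)

-- ===== PORT B =====
-- per buyer: fold setdefault over the windows covered by both lists, then one dict lookup
def evaluate_sequence_batch_alt (args : List Int × List (List Int) × List (List Int)) : List Int × Int :=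
  let sequence := args.1
  let total := (args.2.1.zip args.2.2).foldl
    (fun total cp =>
      let first := (PySem.List.pyRange 0 (((min cp.1.length cp.2.length : Nat) : Int) - 3) 1).foldl
        (fun d i => d.setdefault (PySem.List.slice cp.1 (some i) (some (i + 4)))
                      ((PySem.List.pyGet? cp.2 (i + 3)).getD 0))
        PySem.Dict.empty
      total + first.getD sequence 0) 0
  (sequence, total)

-- ===== PRECONDITION & SPEC =====
-- the 4-change window of cs starting at index i
def pvWin (cs : List Int) (i : Nat) : List Int := (cs.drop i).take 4

-- Pre_ excludes exactly the inputs on which A raises IndexError: some buyer's first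
-- window matching the sequence ends past the end of that buyer's prices list.
def Pre_evaluate_sequence_batch (args : List Int × List (List Int) × List (List Int)) : Prop :=
  ∀ cp ∈ args.2.1.zip args.2.2, ∀ i < cp.1.length,
    i + 4 ≤ cp.1.length → pvWin cp.1 i = args.1 →
    (∀ j < i, pvWin cp.1 j ≠ args.1) → i + 4 ≤ cp.2.length
instance (args : List Int × List (List Int) × List (List Int)) : Decidable (Pre_evaluate_sequence_batch args) := by unfold Pre_evaluate_sequence_batch; infer_instance

def pvWitness_evaluate_sequence_batch : (List Int × List (List Int) × List (List Int)) :=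
  ([1, 2, 3, 4], [[0, 1, 2, 3, 4]], [[5, 6, 7, 8, 9]])

def Spec_evaluate_sequence_batch (args : List Int × List (List Int) × List (List Int)) (out : List Int × Int) : Prop := out = evaluate_sequence_batch_alt args
instance (args : List Int × List (List Int) × List (List Int)) (out : List Int × Int) : Decidable (Spec_evaluate_sequence_batch args out) := by unfold Spec_evaluate_sequence_batch; infer_instance

-- ===== CLAIM (what is proved, stated in full; the proofs are below) =====
def Claim_equal_evaluate_sequence_batch : Prop := ∀ (args : List Int × List (List Int) × List (List Int)), Dom_evaluate_sequence_batch args → Pre_evaluate_sequence_batch args → Spec_evaluate_sequence_batch args (evaluate_sequence_batch args)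

-- ===== LEMMAS AND PROOFS =====

-- spec-level first-match value over a list of Nat indices
def firstVal (changes sequence prices : List Int) : List Nat → Int
  | [] => 0
  | k :: rest =>
    if pvWin changes k = sequence then (prices[k + 3]?).getD 0
    else firstVal changes sequence prices rest

theorem fsvGo_eq_firstVal (changes sequence prices : List Int) (L : List Nat) :
    fsvGo changes sequence prices (L.map (fun k : Nat => (k : Int))) =
      firstVal changes sequence prices L := by
  induction L with
  | nil => rfl
  | cons k rest ih =>
    simp only [List.map_cons, fsvGo, firstVal]
    have hs : PySem.List.slice changes (some (k : Int)) (some ((k : Int) + 4)) = pvWin changes k := by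
      have : ((k : Int) + 4) = ((k : Int) + ((4 : Nat) : Int)) := by norm_cast
      rw [this, PySem.List.slice_natCast_add]
      rfl
    have hg : PySem.List.pyGet? prices ((k : Int) + 3) = prices[k + 3]? := by
      have : ((k : Int) + 3) = (((k + 3 : Nat) : Int)) := by push_cast; ring
      rw [this, PySem.List.pyGet?_natCast]
    rw [hs, hg, ih]

theorem firstVal_append_no_match (changes sequence prices : List Int) (L₁ L₂ : List Nat)
    (h : ∀ k ∈ L₁, pvWin changes k ≠ sequence) :
    firstVal changes sequence prices (L₁ ++ L₂) = firstVal changes sequence prices L₂ := by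
  induction L₁ with
  | nil => rfl
  | cons k rest ih =>
    simp only [List.cons_append, firstVal, if_neg (h k (by simp))]
    exact ih (fun j hj => h j (by simp [hj]))

theorem firstVal_append_match (changes sequence prices : List Int) (L₁ L₂ : List Nat)
    (h : ∃ k ∈ L₁, pvWin changes k = sequence) :
    firstVal changes sequence prices (L₁ ++ L₂) = firstVal changes sequence prices L₁ := by
  induction L₁ with
  | nil => simp at h
  | cons k rest ih =>
    simp only [List.cons_append, firstVal]
    by_cases hk : pvWin changes k = sequence
    · simp [hk]
    · rw [if_neg hk, if_neg hk]
      apply ih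
      obtain ⟨j, hj, hje⟩ := h
      rcases List.mem_cons.mp hj with h1 | h2
      · exact absurd (h1 ▸ hje) hk
      · exact ⟨j, h2, hje⟩

theorem firstVal_zero_of_no_match (changes sequence prices : List Int) (L : List Nat)
    (h : ∀ k ∈ L, pvWin changes k ≠ sequence) :
    firstVal changes sequence prices L = 0 := by
  have := firstVal_append_no_match changes sequence prices L [] h
  simpa using this

-- dict side: folding setdefault and reading back the key is the first-match value
theorem foldl_setdefault_getD (changes sequence prices : List Int) (L : List Nat)
    (d : PySem.Dict (List Int) Int) :
    ((L.foldl (fun d k => d.setdefault (pvWin changes k) ((prices[k + 3]?).getD 0)) d).getD sequence 0) =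
      match d.get? sequence with
      | some v => v
      | none => firstVal changes sequence prices L := by
  induction L generalizing d with
  | nil =>
    rw [List.foldl_nil, PySem.Dict.getD_eq_get?_getD]
    cases d.get? sequence <;> rfl
  | cons k rest ih =>
    simp only [List.foldl_cons]
    rw [ih]
    by_cases hk : pvWin changes k = sequence
    · rw [hk, PySem.Dict.get?_setdefault_self]
      cases h : d.get? sequence with
      | some v => simp
      | none => simp [firstVal, hk]
    · have hne : sequence ≠ pvWin changes k := fun he => hk he.symm
      rw [PySem.Dict.get?_setdefault_of_ne d _ hne]
      cases h : d.get? sequence with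
      | some v => rfl
      | none => simp [firstVal, hk]

-- B's inner fold, cast from Int indices to Nat indices
theorem foldl_map_cast (changes prices : List Int) (L : List Nat)
    (d : PySem.Dict (List Int) Int) :
    ((L.map (fun k : Nat => (k : Int))).foldl
        (fun d i => d.setdefault (PySem.List.slice changes (some i) (some (i + 4)))
          ((PySem.List.pyGet? prices (i + 3)).getD 0)) d) =
      (L.foldl (fun d k => d.setdefault (pvWin changes k) ((prices[k + 3]?).getD 0)) d) := by
  induction L generalizing d with
  | nil => rfl
  | cons k rest ih =>
    simp only [List.map_cons, List.foldl_cons]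
    have hs : PySem.List.slice changes (some (k : Int)) (some ((k : Int) + 4)) = pvWin changes k := by
      have : ((k : Int) + 4) = ((k : Int) + ((4 : Nat) : Int)) := by norm_cast
      rw [this, PySem.List.slice_natCast_add]
      rfl
    have hg : PySem.List.pyGet? prices ((k : Int) + 3) = prices[k + 3]? := by
      have : ((k : Int) + 3) = (((k + 3 : Nat) : Int)) := by push_cast; ring
      rw [this, PySem.List.pyGet?_natCast]
    rw [hs, hg, ih]

-- pyRange 0 n 1 as a mapped Nat range
theorem pyRange_zero_eq_map (n : Int) :
    PySem.List.pyRange 0 n 1 = (List.range n.toNat).map (fun k : Nat => (k : Int)) := by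
  rw [PySem.List.pyRange_one]
  simp

-- per-pair equality of scores under the per-pair precondition
theorem pair_score_eq (sequence changes prices : List Int)
    (hpre : ∀ i < changes.length, i + 4 ≤ changes.length → pvWin changes i = sequence →
      (∀ j < i, pvWin changes j ≠ sequence) → i + 4 ≤ prices.length) :
    find_sequence_value changes sequence prices =
      (((PySem.List.pyRange 0 (((min changes.length prices.length : Nat) : Int) - 3) 1).foldl
        (fun d i => d.setdefault (PySem.List.slice changes (some i) (some (i + 4)))
          ((PySem.List.pyGet? prices (i + 3)).getD 0))
        PySem.Dict.empty).getD sequence 0) := by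
  set NA : Nat := ((changes.length : Int) - 3).toNat with hNA
  set NB : Nat := ((((min changes.length prices.length : Nat) : Int)) - 3).toNat with hNB
  have hBA : NB ≤ NA := by omega
  -- rewrite both sides to firstVal over Nat ranges
  have hA : find_sequence_value changes sequence prices =
      firstVal changes sequence prices (List.range NA) := by
    rw [find_sequence_value, pyRange_zero_eq_map, fsvGo_eq_firstVal]
  have hB : (((PySem.List.pyRange 0 (((min changes.length prices.length : Nat) : Int) - 3) 1).foldl
        (fun d i => d.setdefault (PySem.List.slice changes (some i) (some (i + 4)))
          ((PySem.List.pyGet? prices (i + 3)).getD 0))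
        PySem.Dict.empty).getD sequence 0) =
      firstVal changes sequence prices (List.range NB) := by
    rw [pyRange_zero_eq_map, foldl_map_cast, foldl_setdefault_getD,
       PySem.Dict.get?_empty]
  rw [hA, hB]
  -- split range NA at NB
  have hsplit : List.range NA = List.range NB ++ (List.range (NA - NB)).map (fun k => NB + k) := by
    have h : NA = NB + (NA - NB) := by omega
    rw [h, List.range_add]
    simp
  by_cases hm : ∃ k ∈ List.range NB, pvWin changes k = sequence
  · rw [hsplit, firstVal_append_match changes sequence prices _ _ hm]
  · push Not at hm
    -- no match anywhere in range NA: a first match in [NB, NA) would contradict hpre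
    have hnone : ∀ k ∈ List.range NA, pvWin changes k ≠ sequence := by
      intro k hk hke
      have hkNA : k < NA := List.mem_range.mp hk
      -- take the least matching index ≤ k
      by_cases hkNB : k < NB
      · exact hm k (List.mem_range.mpr hkNB) hke
      · -- find the least matching index m ≤ k; it is still ≥ NB by hm
        have hex : ∃ m, m ≤ k ∧ pvWin changes m = sequence ∧ ∀ j < m, pvWin changes j ≠ sequence := by
          classical
          have hP : ∃ m, pvWin changes m = sequence := ⟨k, hke⟩
          exact ⟨Nat.find hP, Nat.find_min' hP hke, Nat.find_spec hP,
            fun j hj => Nat.find_min hP hj⟩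
        obtain ⟨m, hmk, hme, hmfirst⟩ := hex
        have hmNB : ¬ m < NB := fun h => hm m (List.mem_range.mpr h) hme
        have hm4 : m + 4 ≤ changes.length := by
          have hlt : m < NA := lt_of_le_of_lt hmk hkNA
          omega
        have := hpre m (by omega) hm4 hme hmfirst
        exact hmNB (by omega)
    rw [firstVal_zero_of_no_match changes sequence prices _ hnone,
        firstVal_zero_of_no_match changes sequence prices _ (by intro k hk; exact hnone k (List.mem_range.mpr (lt_of_lt_of_le (List.mem_range.mp hk) hBA)))]

-- ===== VERDICT (by name: the statement is the Claim_ definition above) =====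
theorem evaluate_sequence_batch_spec : Claim_equal_evaluate_sequence_batch := by
  intro args _hdom hpre
  unfold Spec_evaluate_sequence_batch evaluate_sequence_batch evaluate_sequence_batch_alt
  obtain ⟨sequence, allc, allp⟩ := args
  simp only
  congr 1
  apply PySem.List.foldl_congr_mem
  intro total cp hmem
  have hp := hpre cp hmem
  have hscore := pair_score_eq sequence cp.1 cp.2 hp
  rw [← hscore]
  by_cases h : find_sequence_value cp.1 sequence cp.2 = 0
  · simp [h]
  · simp [h]
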